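-- pv_equiv track=rewrite | github.com/sergioariza-programa/Repositorio-DDYA | Semana 3/suma_bits.py | encontrar_N
-- ===== SOURCE A (Python) =====
-- def contar_bits_hasta(N):
--
--     total = 0
--
--     bit = 0
--
--     while (1 << bit) <= N:
--
--         bloque = 1 << (bit + 1)
--
--         completos = N // bloque
--
--         total += completos * (1 << bit)
--
--         resto = N % bloque
--
--         total += max(0, resto - (1 << bit) + 1)
--
--         bit += 1
--
--     return total
--
-- def encontrar_N(X):
--
--     l = 1
--
--     r = 10**18
--
--     while l < r:
--
--         m = (l + r) // 2
--
--         if contar_bits_hasta(m) >= X: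
--
--             r = m
--
--         else:
--
--             l = m + 1
--
--     return l
-- ===== SOURCE B (Python) =====
-- def contar_bits_hasta(N):
--     # recursion on the highest set bit of N instead of a per-bit-position loop
--     if N <= 0:
--         return 0
--     a = N.bit_length() - 1
--     p = 1 << a
--     return a * (p >> 1) + (N - p + 1) + contar_bits_hasta(N - p)
--
-- def encontrar_N(X):
--     R = 10**18
--     # descending-bit search: grow n to the largest value <= R-1 whose
--     # cumulative bit count is still < X, then the answer is n + 1
--     n = 0
--     for k in range(59, -1, -1):
--         if n + (1 << k) <= R - 1 and contar_bits_hasta(n + (1 << k)) < X: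
--             n = n + (1 << k)
--     return n + 1
-- ===== Notes on version B (the rewrite author's own statement) =====
-- stated objective: alternative
-- what changed: B replaces both halves: contar_bits_hasta becomes a recursion on the highest set bit (closed-form count below the top power of two plus a recursive call on the remainder) instead of a per-bit-position loop of divisions, and the l<r halving binary search is replaced by a descending-bit greedy that builds the largest n with count < X bit by bit and returns n+1.
import Mathlib
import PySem

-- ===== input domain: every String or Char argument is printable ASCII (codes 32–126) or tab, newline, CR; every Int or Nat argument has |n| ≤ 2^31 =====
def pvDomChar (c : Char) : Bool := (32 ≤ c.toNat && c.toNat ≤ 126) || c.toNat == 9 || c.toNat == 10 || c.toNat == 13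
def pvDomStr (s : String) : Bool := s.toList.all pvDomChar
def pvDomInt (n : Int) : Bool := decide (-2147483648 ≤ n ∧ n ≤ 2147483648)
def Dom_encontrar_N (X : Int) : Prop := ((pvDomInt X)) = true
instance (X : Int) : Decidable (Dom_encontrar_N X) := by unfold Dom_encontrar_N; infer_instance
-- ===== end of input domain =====

-- B replaces the per-bit counting loop by a recursion on the highest set bit and the halving
-- binary search by a descending-bit greedy construction; same cost, different algorithm.
-- Both while-loops are ported as fuel-bounded structural recursion; the fuel only makes the
-- recursion total and is proved sufficient on every value the entry point can reach.

-- ===== PORT A =====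
-- the while-loop of contar_bits_hasta ('1 << bit' is 2^bit; bloque = 2^(bit+1),
-- completos = N // bloque, resto = N % bloque are inlined); the Nat counter only bounds
-- the iteration count (62 iterations cover every N < 2^61; the search probes N ≤ 10^18)
def pvContarLoopA (N : Int) : Nat → Nat → Int → Int
  | 0, _, total => total
  | Nat.succ fuel, bit, total =>
    if (2:Int)^bit ≤ N then
      pvContarLoopA N fuel (bit+1)
        (total + PySem.Int.floordiv N (2^(bit+1)) * 2^bit
               + max 0 (PySem.Int.mod N (2^(bit+1)) - 2^bit + 1))
    else total

def pvContarBitsHastaA (N : Int) : Int := pvContarLoopA N 62 0 0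

-- the while-loop of encontrar_N; the interval r - l < 2^60 at the call site halves each
-- iteration, so 60 iterations always reach l = r
def pvSearchLoopA (X : Int) : Nat → Int → Int → Int
  | 0, l, _ => l
  | Nat.succ fuel, l, r =>
    if l < r then
      let m := PySem.Int.floordiv (l + r) 2
      if pvContarBitsHastaA m ≥ X then pvSearchLoopA X fuel l m
      else pvSearchLoopA X fuel (m+1) r
    else l

def encontrar_N (X : Int) : Int := pvSearchLoopA X 60 1 (10^18)

-- ===== PORT B =====
-- recursion on the highest set bit: a = N.bit_length() - 1, p = 1 << a,
-- result = a * (p >> 1) + (N - p + 1) + contar_bits_hasta(N - p); the Nat counter only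
-- bounds the recursion depth (≤ number of set bits, ≤ 64 for every reachable N)
def pvContarAltGo : Nat → Int → Int
  | 0, _ => 0
  | Nat.succ fuel, N =>
    if N ≤ 0 then 0
    else
      let a : Nat := PySem.Int.bitLength N - 1
      let p : Int := 2^a
      (a : Int) * (p >>> (1:Nat)) + (N - p + 1) + pvContarAltGo fuel (N - p)

def pvContarBitsHastaAlt (N : Int) : Int := pvContarAltGo 64 N

-- the 'for k in range(59, -1, -1)' loop of B: try to add 1 << k to n, bits k-1..0 remain
def pvDescendB (X n : Int) : Nat → Int
  | 0 => n
  | Nat.succ k =>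
    pvDescendB X
      (if n + 2^k ≤ 10^18 - 1 ∧ pvContarBitsHastaAlt (n + 2^k) < X then n + 2^k else n) k

def encontrar_N_alt (X : Int) : Int := pvDescendB X 0 60 + 1

-- ===== PRECONDITION & SPEC =====
def Spec_encontrar_N (X : Int) (out : Int) : Prop := out = encontrar_N_alt X
instance (X : Int) (out : Int) : Decidable (Spec_encontrar_N X out) := by unfold Spec_encontrar_N; infer_instance

-- ===== CLAIM (what is proved, stated in full; the proofs are below) =====
def Claim_equal_encontrar_N : Prop := ∀ (X : Int), Dom_encontrar_N X → Spec_encontrar_N X (encontrar_N X)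

-- ===== LEMMAS AND PROOFS =====

-- one iteration's contribution of A's loop at bit position j
def pvTerm (N : Int) (j : Nat) : Int :=
  PySem.Int.floordiv N (2^(j+1)) * 2^j + max 0 (PySem.Int.mod N (2^(j+1)) - 2^j + 1)

theorem pvTerm_small (N : Int) (j : Nat) (h0 : 0 ≤ N) (h : N < 2^(j+1)) :
    pvTerm N j = max 0 (N - 2^j + 1) := by
  have hd : PySem.Int.floordiv N (2^(j+1)) = 0 := by
    rw [PySem.Int.floordiv_eq_ediv_of_pos (by positivity)]
    exact Int.ediv_eq_zero_of_lt h0 h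
  have hm : PySem.Int.mod N (2^(j+1)) = N := by
    have e := PySem.Int.floordiv_mul_add_mod N (2^(j+1))
    rw [hd] at e; linarith
  unfold pvTerm
  rw [hd, hm]
  ring

theorem pvTerm_zero (N : Int) (j : Nat) (h0 : 0 ≤ N) (h : N < 2^j) : pvTerm N j = 0 := by
  have h2 : (2:Int)^j < 2^(j+1) := by
    have e : (2:Int)^(j+1) = 2^j * 2 := by ring
    nlinarith [pow_pos (show (0:Int) < 2 by norm_num) j]
  rw [pvTerm_small N j h0 (by linarith)]
  omega

theorem pvTerm_mono (M N : Int) (j : Nat) (_hM0 : 0 ≤ M) (h : M ≤ N) :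
    pvTerm M j ≤ pvTerm N j := by
  have hp : (1:Int) ≤ 2^j := one_le_pow₀ (by norm_num)
  have hB : (2:Int)^(j+1) = 2 * 2^j := by ring
  have eM := PySem.Int.floordiv_mul_add_mod M (2^(j+1))
  have eN := PySem.Int.floordiv_mul_add_mod N (2^(j+1))
  have hrM0 := PySem.Int.mod_nonneg M (b := 2^(j+1)) (by positivity)
  have hrM1 := PySem.Int.mod_lt M (b := 2^(j+1)) (by positivity)
  have hrN0 := PySem.Int.mod_nonneg N (b := 2^(j+1)) (by positivity)
  have hrN1 := PySem.Int.mod_lt N (b := 2^(j+1)) (by positivity)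
  set p : Int := 2^j with hpdef
  set qM := PySem.Int.floordiv M (2^(j+1)) with hqM
  set qN := PySem.Int.floordiv N (2^(j+1)) with hqN
  set rM := PySem.Int.mod M (2^(j+1)) with hrM
  set rN := PySem.Int.mod N (2^(j+1)) with hrN
  rw [hB] at eM eN hrM1 hrN1
  have hq : qM ≤ qN := by nlinarith
  unfold pvTerm
  rw [← hqM, ← hqN, ← hrM, ← hrN, ← hpdef]
  rcases lt_or_eq_of_le hq with hlt | heq
  · have h1 : max 0 (rM - p + 1) ≤ p := by omega
    have h2 : (0:Int) ≤ max 0 (rN - p + 1) := le_max_left _ _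
    nlinarith
  · have hr : rM ≤ rN := by nlinarith [heq]
    rw [heq]
    omega

theorem pvLoopA_sum (c : Nat) : ∀ (f : Nat) (N : Int) (bit : Nat) (t : Int), c ≤ f → 0 ≤ N →
    N < 2^(bit + c) →
    pvContarLoopA N f bit t = t + ∑ j ∈ Finset.range c, pvTerm N (bit + j) := by
  induction c with
  | zero =>
    intro f N bit t _ h0 hlt
    simp only [Nat.add_zero] at hlt
    cases f with
    | zero => simp [pvContarLoopA]
    | succ f => rw [pvContarLoopA, if_neg (not_le.mpr hlt)]; simp
  | succ c ih =>
    intro f N bit t hcf h0 hlt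
    obtain ⟨f', rfl⟩ : ∃ f', f = f' + 1 := ⟨f - 1, by omega⟩
    by_cases h : (2:Int)^bit ≤ N
    · rw [pvContarLoopA, if_pos h]
      rw [ih f' N (bit+1) _ (by omega) h0
        (by rw [show bit+1+c = bit+(c+1) by omega]; exact hlt)]
      rw [Finset.sum_range_succ']
      have he : ∀ j, bit + 1 + j = bit + (j + 1) := by omega
      simp only [he, Nat.add_zero]
      unfold pvTerm
      ring
    · rw [pvContarLoopA, if_neg h]
      have hz : ∀ j ∈ Finset.range (c+1), pvTerm N (bit + j) = 0 := by
        intro j _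
        apply pvTerm_zero N _ h0
        calc N < 2^bit := not_le.mp h
        _ ≤ 2^(bit+j) := by apply pow_le_pow_right₀ (by norm_num); omega
      rw [Finset.sum_congr rfl hz]
      simp

theorem pvA_closed (N : Int) (c : Nat) (hc : c ≤ 62) (h0 : 0 ≤ N) (h : N < 2^c) :
    pvContarBitsHastaA N = ∑ j ∈ Finset.range c, pvTerm N j := by
  have := pvLoopA_sum c 62 N 0 0 hc h0 (by simpa using h)
  simpa [pvContarBitsHastaA] using this

-- cumulative bit count is monotone (over the range every search value lies in)
theorem pvF_mono (M N : Int) (h0 : 0 ≤ M) (h : M ≤ N) (hN : N < 2^61) :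
    pvContarBitsHastaA M ≤ pvContarBitsHastaA N := by
  have hN0 : 0 ≤ N := le_trans h0 h
  rw [pvA_closed M 61 (by norm_num) h0 (lt_of_le_of_lt h hN),
    pvA_closed N 61 (by norm_num) hN0 hN]
  exact Finset.sum_le_sum (fun j _ => pvTerm_mono M N j h0 h)

theorem pvTerm_split (M : Int) (a j : Nat) (hj : j < a) (_h0 : 0 ≤ M) (_hM : M < 2^a) :
    pvTerm (2^a + M) j = 2^(a-1) + pvTerm M j := by
  have hBpos : (0:Int) < 2^(j+1) := by positivity
  have hpow : (2:Int)^a = 2^(a-j-1) * 2^(j+1) := by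
    rw [← pow_add]; congr 1; omega
  have hd : PySem.Int.floordiv (2^a + M) (2^(j+1)) = 2^(a-j-1) + PySem.Int.floordiv M (2^(j+1)) := by
    rw [PySem.Int.floordiv_eq_ediv_of_pos hBpos, PySem.Int.floordiv_eq_ediv_of_pos hBpos, hpow]
    rw [add_comm ((2:Int)^(a-j-1) * 2^(j+1)) M, Int.add_mul_ediv_right _ _ (by positivity)]
    ring
  have hm : PySem.Int.mod (2^a + M) (2^(j+1)) = PySem.Int.mod M (2^(j+1)) := by
    have e1 := PySem.Int.floordiv_mul_add_mod (2^a + M) (2^(j+1))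
    have e2 := PySem.Int.floordiv_mul_add_mod M (2^(j+1))
    rw [hd] at e1
    linear_combination e1 - e2 + hpow
  have hp2 : (2:Int)^(a-j-1) * 2^j = 2^(a-1) := by
    rw [← pow_add]; congr 1; omega
  unfold pvTerm
  rw [hd, hm, add_mul, hp2]
  ring

theorem pvShift_pow (n : Nat) : ((2:Int)^(n+1)) >>> (1:Nat) = (2:Int)^n := by
  rw [Int.shiftRight_eq_div_pow, pow_succ]
  push_cast
  rw [Int.mul_ediv_cancel _ (by norm_num)]

theorem pvContar_eq_aux : ∀ (fuel : Nat) (N : Int), N < 2^fuel → N < 2^61 →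
    pvContarAltGo fuel N = pvContarBitsHastaA N := by
  intro fuel
  induction fuel with
  | zero =>
    intro N hf _
    have hN : N ≤ 0 := by omega
    rw [pvContarAltGo, pvContarBitsHastaA, pvContarLoopA,
      if_neg (by simpa using by omega : ¬ (2:Int)^0 ≤ N)]
  | succ fuel ih =>
    intro N hf h61
    by_cases hN : N ≤ 0
    · rw [pvContarAltGo, if_pos hN, pvContarBitsHastaA, pvContarLoopA,
        if_neg (by simpa using by omega : ¬ (2:Int)^0 ≤ N)]
    · rw [not_le] at hN
      have h0 : 0 ≤ N := le_of_lt hN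
      have hbl1 : 1 ≤ PySem.Int.bitLength N := by
        by_contra hc
        have h1 := PySem.Int.lt_two_pow_bitLength N
        interval_cases h : PySem.Int.bitLength N
        · simp at h1; omega
      set a : Nat := PySem.Int.bitLength N - 1 with ha
      have hup : N < 2^(a+1) := by
        have h1 := PySem.Int.lt_two_pow_bitLength N
        have h2 : a + 1 = PySem.Int.bitLength N := by omega
        have h3 : (N.natAbs : Int) < (2:Int)^(a+1) := by rw [h2]; exact_mod_cast h1
        rwa [Int.natAbs_of_nonneg h0] at h3
      have hlo : (2:Int)^a ≤ N := by
        have h1 := PySem.Int.two_pow_bitLength_le N (by omega)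
        rw [← ha] at h1
        have h3 : (2:Int)^a ≤ (N.natAbs : Int) := by exact_mod_cast h1
        rwa [Int.natAbs_of_nonneg h0] at h3
      -- a + 1 ≤ fuel + 1 and a + 1 ≤ 61, from N < 2^(fuel+1), N < 2^61, 2^a ≤ N
      have hafuel : a ≤ fuel := by
        by_contra hc
        have : (2:Int)^(fuel+1) ≤ 2^a := pow_le_pow_right₀ (by norm_num) (by omega)
        omega
      have ha61 : a + 1 ≤ 61 := by
        by_contra hc
        have : (2:Int)^61 ≤ 2^a := pow_le_pow_right₀ (by norm_num) (by omega)
        omega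
      have hpa : (1:Int) ≤ 2^a := one_le_pow₀ (by norm_num)
      have hdouble : (2:Int)^(a+1) = 2^a * 2 := by ring
      have hM0 : 0 ≤ N - 2^a := by linarith
      have hMlt : N - 2^a < 2^a := by linarith
      have hA : pvContarBitsHastaA N =
          (∑ j ∈ Finset.range a, pvTerm N j) + (N - 2^a + 1) := by
        rw [pvA_closed N (a+1) (by omega) h0 hup, Finset.sum_range_succ,
          pvTerm_small N a h0 hup]
        have : max 0 (N - 2^a + 1) = N - 2^a + 1 := by omega
        rw [this]
      have hsplit : (∑ j ∈ Finset.range a, pvTerm N j)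
          = (a:Int) * 2^(a-1) + ∑ j ∈ Finset.range a, pvTerm (N - 2^a) j := by
        have step : ∀ j ∈ Finset.range a, pvTerm N j = (2:Int)^(a-1) + pvTerm (N - 2^a) j := by
          intro j hjm
          have h4 := pvTerm_split (N - 2^a) a j (Finset.mem_range.mp hjm) hM0 hMlt
          rwa [show (2:Int)^a + (N - 2^a) = N by ring] at h4
        rw [Finset.sum_congr rfl step, Finset.sum_add_distrib, Finset.sum_const,
          Finset.card_range, nsmul_eq_mul]
      have hArec : pvContarBitsHastaA (N - 2^a)
          = ∑ j ∈ Finset.range a, pvTerm (N - 2^a) j :=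
        pvA_closed _ a (by omega) hM0 hMlt
      have hfrec : N - 2^a < 2^fuel := by
        have : (2:Int)^a ≤ 2^fuel := pow_le_pow_right₀ (by norm_num) hafuel
        omega
      rw [pvContarAltGo, if_neg (by omega)]
      simp only [← ha]
      rw [ih (N - 2^a) hfrec (by omega)]
      have hshift : (a:Int) * ((2:Int)^a >>> (1:Nat)) = (a:Int) * 2^(a-1) := by
        cases a with
        | zero => decide
        | succ m => rw [pvShift_pow, Nat.add_sub_cancel]
      rw [hshift, hA, hsplit, hArec]
      ring

theorem pvContar_eq (N : Int) (h61 : N < 2^61) :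
    pvContarBitsHastaA N = pvContarAltGo 64 N := by
  have h : (2:Int)^61 ≤ 2^64 := by norm_num
  rw [pvContar_eq_aux 64 N (by omega) h61]

-- the common characterization: res is the first point ≥ l where the count reaches X, clamped at r
def pvIsAnswer (X l r res : Int) : Prop :=
  l ≤ res ∧ res ≤ r ∧ (∀ m, l ≤ m → m < res → pvContarBitsHastaA m < X) ∧
    (X ≤ pvContarBitsHastaA res ∨ res = r)

theorem pvAnswer_unique (X l r res1 res2 : Int)
    (h1 : pvIsAnswer X l r res1) (h2 : pvIsAnswer X l r res2) : res1 = res2 := by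
  obtain ⟨hl1, hr1, hall1, hend1⟩ := h1
  obtain ⟨hl2, hr2, hall2, hend2⟩ := h2
  by_contra hne
  rcases lt_or_gt_of_ne hne with hlt | hlt
  · have := hall2 res1 hl1 hlt
    rcases hend1 with h | h
    · omega
    · omega
  · have := hall1 res2 hl2 hlt
    rcases hend2 with h | h
    · omega
    · omega

-- A's binary search computes the answer (the fuel bound halves the interval each step)
theorem pvSearchA_char (X : Int) : ∀ (fuel : Nat) (l r : Int), 1 ≤ l → l ≤ r → r ≤ 10^18 →
    r - l < 2^fuel → pvIsAnswer X l r (pvSearchLoopA X fuel l r) := by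
  intro fuel
  induction fuel with
  | zero =>
    intro l r hl1 hlr _ hf
    have : l = r := by omega
    subst this
    rw [pvSearchLoopA]
    exact ⟨le_refl l, le_refl l,
      fun m hm1 hm2 => absurd (lt_of_le_of_lt hm1 hm2) (lt_irrefl l), Or.inr rfl⟩
  | succ fuel ih =>
    intro l r hl1 hlr hr18 hf
    rw [pvSearchLoopA]
    by_cases h : l < r
    · rw [if_pos h]
      have e := PySem.Int.floordiv_mul_add_mod (l + r) 2
      have h0 := PySem.Int.mod_nonneg (l + r) (b := 2) (by norm_num)
      have h2 := PySem.Int.mod_lt (l + r) (b := 2) (by norm_num)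
      have hpow : (2:Int)^(fuel+1) = 2^fuel + 2^fuel := by ring
      set m := PySem.Int.floordiv (l + r) 2 with hm
      have hm1 : l ≤ m := by omega
      have hm2 : m < r := by omega
      show pvIsAnswer X l r
        (if pvContarBitsHastaA m ≥ X then pvSearchLoopA X fuel l m
         else pvSearchLoopA X fuel (m+1) r)
      by_cases ht : pvContarBitsHastaA m ≥ X
      · rw [if_pos ht]
        obtain ⟨hl, hr, hall, hend⟩ := ih l m hl1 hm1 (by omega) (by omega)
        refine ⟨hl, by omega, hall, ?_⟩
        rcases hend with hx | hx
        · exact Or.inl hx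
        · exact Or.inl (by rw [hx]; exact ht)
      · rw [if_neg ht]
        obtain ⟨hl, hr, hall, hend⟩ := ih (m+1) r (by omega) (by omega) hr18 (by omega)
        refine ⟨by omega, hr, ?_, hend⟩
        intro n hn1 hn2
        by_cases hc : n ≤ m
        · have h61 : m < 2^61 := by
            have : (10:Int)^18 < 2^61 := by norm_num
            omega
          have := pvF_mono n m (by omega) hc h61
          omega
        · exact hall n (by omega) hn2
    · rw [if_neg h]
      exact ⟨le_refl l, hlr,
        fun m hm1 hm2 => absurd (lt_of_le_of_lt hm1 hm2) (lt_irrefl l), Or.inr (by omega)⟩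

-- B's descending-bit loop: n stays reachable with count < X (or n = 0), while
-- n + 2^(remaining span) already overshoots in value or in count
theorem pvDescendB_char (X : Int) : ∀ (c : Nat) (n : Int), c ≤ 60 → 0 ≤ n → n ≤ 10^18 - 1 →
    (pvContarBitsHastaA n < X ∨ n = 0) →
    (10^18 - 1 < n + 2^c ∨ X ≤ pvContarBitsHastaA (n + 2^c)) →
    0 ≤ pvDescendB X n c ∧ pvDescendB X n c ≤ 10^18 - 1 ∧
      (pvContarBitsHastaA (pvDescendB X n c) < X ∨ pvDescendB X n c = 0) ∧
      (10^18 - 1 < pvDescendB X n c + 1 ∨ X ≤ pvContarBitsHastaA (pvDescendB X n c + 1)) := by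
  intro c
  induction c with
  | zero =>
    intro n _ hn0 hnr hcnt hinv
    rw [pow_zero] at hinv
    exact ⟨hn0, hnr, hcnt, hinv⟩
  | succ k ih =>
    intro n hc60 hn0 hnr hcnt hinv
    have hp : (1:Int) ≤ 2^k := one_le_pow₀ (by norm_num)
    have hk61 : n + 2^k < 2^61 := by
      have h1 : (2:Int)^k ≤ 2^59 := pow_le_pow_right₀ (by norm_num) (by omega)
      have h2 : (10:Int)^18 - 1 + 2^59 < 2^61 := by norm_num
      omega
    have hsum : n + 2^k + 2^k = n + 2^(k+1) := by rw [pow_succ]; ring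
    rw [pvDescendB]
    split_ifs with hg
    · have hEq : pvContarBitsHastaA (n + 2^k) < X := by
        rw [pvContar_eq _ hk61]; exact hg.2
      refine ih _ (by omega) (by omega) hg.1 (Or.inl hEq) ?_
      rw [hsum]
      exact hinv
    · refine ih _ (by omega) hn0 hnr hcnt ?_
      rcases not_and_or.mp hg with hc | hc
      · exact Or.inl (by omega)
      · refine Or.inr ?_
        rw [pvContar_eq _ hk61]
        have hc2 : ¬ pvContarAltGo 64 (n + 2^k) < X := hc
        omega

theorem pvAlt_isAnswer (X : Int) : pvIsAnswer X 1 (10^18) (encontrar_N_alt X) := by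
  have h := pvDescendB_char X 60 0 le_rfl le_rfl (by norm_num)
    (Or.inr rfl) (Or.inl (by norm_num))
  obtain ⟨h0, hr, hcnt, hend⟩ := h
  have he : encontrar_N_alt X = pvDescendB X 0 60 + 1 := rfl
  set n := pvDescendB X 0 60 with hn
  rw [pvIsAnswer, he]
  refine ⟨by omega, by omega, ?_, ?_⟩
  · intro m hm1 hm2
    rcases hcnt with hc | hc
    · have h61 : n < 2^61 := by
        have : (10:Int)^18 - 1 < 2^61 := by norm_num
        omega
      have := pvF_mono m n (by omega) (by omega) h61
      omega
    · omega
  · rcases hend with hc | hc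
    · exact Or.inr (by omega)
    · exact Or.inl hc

-- ===== VERDICT (by name: the statement is the Claim_ definition above) =====
theorem encontrar_N_spec : Claim_equal_encontrar_N := by
  intro X _
  unfold Spec_encontrar_N
  exact pvAnswer_unique X 1 (10^18) _ _
    (pvSearchA_char X 60 1 (10^18) le_rfl (by norm_num) le_rfl (by norm_num))
    (pvAlt_isAnswer X)
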